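-- pv_equiv track=rewrite | github.com/1988maciejt/aio2 | bin/libs/utils_list.py | getIndexOfMinimum
-- ===== SOURCE A (Python) =====
-- def getIndexOfMinimum(Numbers : list) -> int:
--   from statistics import median_low
--   Min = min(Numbers)
--   Indices = []
--   for i, n in enumerate(Numbers):
--     if n == Min:
--       Indices.append(i)
--   if len(Indices) < 1:
--     return -1
--   return median_low(Indices)
-- ===== SOURCE B (Python) =====
-- def getIndexOfMinimum(Numbers: list) -> int:
--   m = min(Numbers)
--   k = (Numbers.count(m) - 1) // 2
--   seen = 0
--   for i, n in enumerate(Numbers):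
--     if n == m:
--       if seen == k:
--         return i
--       seen += 1
-- ===== Notes on version B (the rewrite author's own statement) =====
-- stated objective: faster
-- what changed: Instead of materialising the list of all minimum positions and taking its low median, B counts occurrences of the minimum, computes the target rank k=(count-1)//2, and one scan returns the k-th occurrence index directly; no index list and no median_low call.
import Mathlib
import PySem

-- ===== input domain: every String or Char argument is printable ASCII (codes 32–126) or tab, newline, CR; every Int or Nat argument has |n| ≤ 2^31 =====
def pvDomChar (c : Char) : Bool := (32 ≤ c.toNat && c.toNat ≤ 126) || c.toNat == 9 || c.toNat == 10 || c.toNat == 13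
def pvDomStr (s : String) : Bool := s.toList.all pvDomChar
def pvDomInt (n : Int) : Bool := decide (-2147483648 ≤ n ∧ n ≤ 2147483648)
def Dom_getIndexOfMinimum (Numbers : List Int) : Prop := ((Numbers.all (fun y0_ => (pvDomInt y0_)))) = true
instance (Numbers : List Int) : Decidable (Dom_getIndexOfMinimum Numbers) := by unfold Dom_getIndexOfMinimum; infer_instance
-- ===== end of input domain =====

-- B selects the low-median minimum position by rank-counting in one scan (count + k-th occurrence), instead of collecting all minimum indices and calling median_low; O(1) extra space.
-- On the empty list both Pythons raise ValueError from min(); Pre_ excludes it.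


-- ===== PORT A =====
-- statistics.median_low: sort, then data[n//2] if n odd else data[n//2-1]
def medianLow (data : List Int) : Int :=
  let d := PySem.List.sorted data (fun x => x) false
  let n : Int := (d.length : Int)
  if PySem.Int.mod n 2 = 1 then (PySem.List.pyGet? d (PySem.Int.floordiv n 2)).getD 0
  else (PySem.List.pyGet? d (PySem.Int.floordiv n 2 - 1)).getD 0

def getIndexOfMinimum (Numbers : List Int) : Int :=
  match PySem.List.min? Numbers (fun x => x) with
  | none => 0   -- min([]) raises ValueError; excluded by Pre_
  | some Min =>
    let Indices := (PySem.List.enumerate Numbers 0).foldl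
      (fun acc p => if p.2 = Min then acc ++ [p.1] else acc) []
    if Indices.length < 1 then -1 else medianLow Indices

-- ===== PORT B =====
-- the scan: return index as soon as the k-th occurrence of m is seen
def altGo (m k : Int) : List Int → Int → Int → Int
  | [], _, _ => 0   -- unreachable: k < count of m
  | x :: rest, i, seen =>
    if x = m then (if seen = k then i else altGo m k rest (i+1) (seen+1))
    else altGo m k rest (i+1) seen

def getIndexOfMinimum_alt (Numbers : List Int) : Int :=
  match PySem.List.min? Numbers (fun x => x) with
  | none => 0   -- min([]) raises ValueError; excluded by Pre_
  | some m =>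
    let k := PySem.Int.floordiv (PySem.List.count Numbers m - 1) 2
    altGo m k Numbers 0 0

-- ===== PRECONDITION & SPEC =====
-- Pre_ excludes only the empty list, on which A (and B) raise ValueError from min().
def Pre_getIndexOfMinimum (Numbers : List Int) : Prop := Numbers ≠ []
instance (Numbers : List Int) : Decidable (Pre_getIndexOfMinimum Numbers) := by
  unfold Pre_getIndexOfMinimum; infer_instance

def pvWitness_getIndexOfMinimum : List Int := [3, 1, 2, 1]

def Spec_getIndexOfMinimum (Numbers : List Int) (out : Int) : Prop := out = getIndexOfMinimum_alt Numbers
instance (Numbers : List Int) (out : Int) : Decidable (Spec_getIndexOfMinimum Numbers out) := by unfold Spec_getIndexOfMinimum; infer_instance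

-- ===== CLAIM (what is proved, stated in full; the proofs are below) =====
def Claim_equal_getIndexOfMinimum : Prop := ∀ (Numbers : List Int), Dom_getIndexOfMinimum Numbers → Pre_getIndexOfMinimum Numbers → Spec_getIndexOfMinimum Numbers (getIndexOfMinimum Numbers)

-- ===== LEMMAS AND PROOFS =====

-- positions (as Python indices starting at i) of the occurrences of m in xs
def indFrom (m : Int) (xs : List Int) (i : Int) : List Int :=
  ((PySem.List.enumerate xs i).filter (fun p => decide (p.2 = m))).map (·.1)

theorem indFrom_nil (m : Int) (i : Int) : indFrom m [] i = [] := rfl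

theorem indFrom_cons (m x : Int) (xs : List Int) (i : Int) :
    indFrom m (x :: xs) i =
      if x = m then i :: indFrom m xs (i+1) else indFrom m xs (i+1) := by
  simp [indFrom, PySem.List.enumerate_cons]
  split_ifs with h <;> simp [h]

theorem length_indFrom (m : Int) (xs : List Int) :
    ∀ i : Int, (indFrom m xs i).length = xs.count m := by
  induction xs with
  | nil => simp [indFrom_nil]
  | cons x xs ih =>
    intro i
    rw [indFrom_cons]
    by_cases h : x = m <;> simp [h, ih]

theorem altGo_spec (m k : Int) : ∀ (xs : List Int) (i seen : Int),
    seen ≤ k → (k - seen).toNat < (indFrom m xs i).length →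
    altGo m k xs i seen = (indFrom m xs i).getD (k - seen).toNat 0 := by
  intro xs
  induction xs with
  | nil => intro i seen _ h; simp [indFrom_nil] at h
  | cons x xs ih =>
    intro i seen hle hlt
    by_cases hx : x = m
    · rw [indFrom_cons, if_pos hx] at hlt
      unfold altGo
      rw [indFrom_cons, if_pos hx, if_pos hx]
      by_cases hs : seen = k
      · rw [if_pos hs, hs]
        simp
      · rw [if_neg hs]
        have htn : (k - seen).toNat = (k - (seen+1)).toNat + 1 := by omega
        rw [htn, List.getD_cons_succ]
        exact ih (i+1) (seen+1) (by omega) (by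
          simp only [List.length_cons, htn] at hlt; omega)
    · rw [indFrom_cons, if_neg hx] at hlt
      unfold altGo
      rw [indFrom_cons, if_neg hx, if_neg hx]
      exact ih (i+1) seen hle hlt

theorem indFrom_pairwise (m : Int) (xs : List Int) (i : Int) :
    (indFrom m xs i).Pairwise (· < ·) := by
  have h := PySem.List.pairwise_lt_enumerate (xs := xs) (s := i)
  exact List.Pairwise.map _ (fun a b h => h) (List.Pairwise.filter _ h)

theorem getIndexOfMinimum_spec_aux (Numbers : List Int)
    (_hne : Numbers ≠ []) :
    getIndexOfMinimum Numbers = getIndexOfMinimum_alt Numbers := by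
  unfold getIndexOfMinimum getIndexOfMinimum_alt
  cases hmin : PySem.List.min? Numbers (fun x => x) with
  | none => rfl
  | some m =>
    simp only
    have hmem : m ∈ Numbers := PySem.List.min?_mem hmin
    -- A's Indices is indFrom m Numbers 0
    have hInd : (PySem.List.enumerate Numbers 0).foldl
        (fun acc p => if p.2 = m then acc ++ [p.1] else acc) ([] : List Int)
        = indFrom m Numbers 0 := by
      have h := PySem.List.foldl_append_ite
        (l := PySem.List.enumerate Numbers 0) (acc := ([] : List Int))
        (p := fun q : Int × Int => q.2 = m) (f := fun q : Int × Int => q.1)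
      simpa [indFrom] using h
    set L := indFrom m Numbers 0 with hL
    have hlen : L.length = Numbers.count m := length_indFrom m Numbers 0
    have hcpos : 0 < Numbers.count m := List.count_pos_iff.mpr hmem
    have hLne : L ≠ [] := by
      intro h; rw [h] at hlen; simp at hlen; omega
    rw [hInd]
    rw [if_neg (by simp [hlen]; omega)]
    -- sorted L = L
    have hsorted : PySem.List.sorted L (fun x => x) false = L :=
      PySem.List.sorted_eq_self_of_pairwise L (fun x => x)
        ((indFrom_pairwise m Numbers 0).imp le_of_lt)
    -- B's rank k
    have hc1 : (PySem.List.count Numbers m : Int) - 1 = ((Numbers.count m - 1 : Nat) : Int) := by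
      rw [PySem.List.count_eq]; omega
    have hk : PySem.Int.floordiv (PySem.List.count Numbers m - 1) 2
        = (((Numbers.count m - 1) / 2 : Nat) : Int) := by
      rw [hc1]; exact_mod_cast PySem.Int.floordiv_natCast (Numbers.count m - 1) 2
    set c := Numbers.count m with hc
    have hkc : (c - 1) / 2 < c := by omega
    -- B's value
    have hB : altGo m (PySem.Int.floordiv (PySem.List.count Numbers m - 1) 2) Numbers 0 0
        = L.getD ((c - 1) / 2) 0 := by
      rw [hk]
      have hgo := altGo_spec m (((c - 1) / 2 : Nat) : Int) Numbers 0 0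
        (by positivity) (by rw [hlen]; simp; omega)
      rw [hgo]
      have ht : ((((c - 1) / 2 : Nat) : Int) - 0).toNat = (c - 1) / 2 := by omega
      rw [ht]
    rw [hB]
    -- A's value: medianLow L = L.getD ((c-1)/2) 0
    unfold medianLow
    show (if PySem.Int.mod ((PySem.List.sorted L (fun x => x) false).length : Int) 2 = 1
        then (PySem.List.pyGet? (PySem.List.sorted L (fun x => x) false)
          (PySem.Int.floordiv ((PySem.List.sorted L (fun x => x) false).length : Int) 2)).getD 0
        else (PySem.List.pyGet? (PySem.List.sorted L (fun x => x) false)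
          (PySem.Int.floordiv ((PySem.List.sorted L (fun x => x) false).length : Int) 2 - 1)).getD 0)
      = L.getD ((c - 1) / 2) 0
    rw [hsorted, hlen]
    by_cases hpar : c % 2 = 1
    · rw [if_pos (by
        rw [show (2:Int) = ((2:Nat):Int) by norm_num, PySem.Int.mod_natCast c 2]
        exact_mod_cast hpar)]
      rw [show PySem.Int.floordiv ((c : Nat) : Int) 2 = ((c / 2 : Nat) : Int) from
        by exact_mod_cast PySem.Int.floordiv_natCast c 2]
      rw [PySem.List.pyGet?_natCast]
      have : c / 2 = (c - 1) / 2 := by omega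
      rw [this]
      simp [List.getD]
    · rw [if_neg (by
        rw [show (2:Int) = ((2:Nat):Int) by norm_num, PySem.Int.mod_natCast c 2]
        intro h
        exact hpar (by exact_mod_cast h))]
      rw [show PySem.Int.floordiv ((c : Nat) : Int) 2 = ((c / 2 : Nat) : Int) from
        by exact_mod_cast PySem.Int.floordiv_natCast c 2]
      have h2 : ((c / 2 : Nat) : Int) - 1 = (((c / 2 - 1 : Nat)) : Int) := by omega
      rw [h2, PySem.List.pyGet?_natCast]
      have : c / 2 - 1 = (c - 1) / 2 := by omega
      rw [this]
      simp [List.getD]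

-- ===== VERDICT (by name: the statement is the Claim_ definition above) =====
theorem getIndexOfMinimum_spec : Claim_equal_getIndexOfMinimum := by
  intro Numbers _ hpre
  exact getIndexOfMinimum_spec_aux Numbers hpre
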